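-- pv_equiv track=rewrite | github.com/GOLAJ-Enterprises/SP-14-Blue-Chess-AI | chess_engine_OLD/_utils.py | get_coords_between
-- ===== SOURCE A (Python) =====
-- def get_coords_between(
--     start: tuple[int, int], end: tuple[int, int], include_end: bool = False
-- ) -> list[tuple[int, int]]:
--     path = []
--
--     sr, sc = start
--     er, ec = end
--
--     dr = er - sr
--     dc = ec - sc
--
--     # Ensure `end` is orthogonal or diagonal to `start`
--     if sr != er and sc != ec and abs(dr) != abs(dc):
--         return []
--
--     # Determine movement direction
--     row_step = 1 if dr > 0 else -1 if dr < 0 else 0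
--     col_step = 1 if dc > 0 else -1 if dc < 0 else 0
--
--     # Check from first step to end
--     r, c = sr, sc
--     while (next_pos := (r + row_step, c + col_step)) != end:
--         path.append(next_pos)
--         r, c = next_pos
--
--     if include_end:
--         path.append(end)
--
--     return path
-- ===== SOURCE B (Python) =====
-- def get_coords_between(
--     start: tuple[int, int], end: tuple[int, int], include_end: bool = False
-- ) -> list[tuple[int, int]]:
--     sr, sc = start
--     er, ec = end
--     dr = er - sr
--     dc = ec - sc
--     if sr != er and sc != ec and abs(dr) != abs(dc):
--         return []
--     n = max(abs(dr), abs(dc))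
--     rows = range(sr + 1, er) if dr > 0 else range(sr - 1, er, -1) if dr < 0 else [sr] * max(n - 1, 0)
--     cols = range(sc + 1, ec) if dc > 0 else range(sc - 1, ec, -1) if dc < 0 else [sc] * max(n - 1, 0)
--     path = list(zip(rows, cols))
--     if include_end:
--         path.append(end)
--     return path
-- ===== Notes on version B (the rewrite author's own statement) =====
-- stated objective: alternative
-- what changed: B drops A's 2-D step-and-compare while loop (walrus sentinel) entirely: it generates the row sequence and the column sequence independently (a native range on a moving axis, a repeated constant on a static one) and zips the two sequences into the path.
import Mathlib
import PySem

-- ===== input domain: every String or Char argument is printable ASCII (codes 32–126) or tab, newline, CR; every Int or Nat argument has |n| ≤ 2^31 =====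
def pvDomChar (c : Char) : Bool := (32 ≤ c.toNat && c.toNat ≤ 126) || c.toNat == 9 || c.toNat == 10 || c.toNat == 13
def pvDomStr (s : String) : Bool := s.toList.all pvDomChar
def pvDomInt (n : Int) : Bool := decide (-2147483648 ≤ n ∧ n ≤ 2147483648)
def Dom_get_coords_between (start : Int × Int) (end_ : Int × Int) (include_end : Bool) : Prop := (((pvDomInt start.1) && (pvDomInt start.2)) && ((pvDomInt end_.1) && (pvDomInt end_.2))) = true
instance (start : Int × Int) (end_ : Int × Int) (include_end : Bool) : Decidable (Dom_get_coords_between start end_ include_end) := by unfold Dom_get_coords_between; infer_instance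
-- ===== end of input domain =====

-- B replaces A's 2-D step-and-compare while loop by generating the row and column
-- sequences independently (a range on a moving axis, a repeated constant on a static
-- one) and zipping them; objective: alternative (same cost, no stepping loop).

-- ===== PORT A =====
-- A's while loop, transliterated; the Nat argument is fuel (an upper bound on the
-- number of iterations, which merely makes the same computation total — on every
-- input A reaches the loop with, the loop stops by its own condition within it).
def gcbLoop (end_ : Int × Int) (rs cs : Int) : Nat → Int → Int → List (Int × Int) → List (Int × Int)
  | 0, _, _, path => path
  | fuel+1, r, c, path =>
    if (r + rs, c + cs) = end_ then path
    else gcbLoop end_ rs cs fuel (r + rs) (c + cs) (path ++ [(r + rs, c + cs)])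

def get_coords_between (start : Int × Int) (end_ : Int × Int) (include_end : Bool) : List (Int × Int) :=
  let sr := start.1; let sc := start.2
  let er := end_.1; let ec := end_.2
  let dr := er - sr
  let dc := ec - sc
  if sr ≠ er ∧ sc ≠ ec ∧ |dr| ≠ |dc| then []
  else
    let row_step : Int := if dr > 0 then 1 else if dr < 0 then -1 else 0
    let col_step : Int := if dc > 0 then 1 else if dc < 0 then -1 else 0
    let path := gcbLoop end_ row_step col_step (max dr.natAbs dc.natAbs) sr sc []
    if include_end then path ++ [end_] else path

-- ===== PORT B =====
def get_coords_between_alt (start : Int × Int) (end_ : Int × Int) (include_end : Bool) : List (Int × Int) :=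
  let sr := start.1; let sc := start.2
  let er := end_.1; let ec := end_.2
  let dr := er - sr
  let dc := ec - sc
  if sr ≠ er ∧ sc ≠ ec ∧ |dr| ≠ |dc| then []
  else
    let n : Int := max |dr| |dc|
    let rows : List Int :=
      if dr > 0 then PySem.List.pyRange (sr + 1) er 1
      else if dr < 0 then PySem.List.pyRange (sr - 1) er (-1)
      else List.replicate (max (n - 1) 0).toNat sr
    let cols : List Int :=
      if dc > 0 then PySem.List.pyRange (sc + 1) ec 1
      else if dc < 0 then PySem.List.pyRange (sc - 1) ec (-1)
      else List.replicate (max (n - 1) 0).toNat sc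
    let path := rows.zip cols
    if include_end then path ++ [end_] else path

-- ===== PRECONDITION & SPEC =====
def Spec_get_coords_between (start : Int × Int) (end_ : Int × Int) (include_end : Bool) (out : List (Int × Int)) : Prop := out = get_coords_between_alt start end_ include_end
instance (start : Int × Int) (end_ : Int × Int) (include_end : Bool) (out : List (Int × Int)) : Decidable (Spec_get_coords_between start end_ include_end out) := by unfold Spec_get_coords_between; infer_instance

-- ===== CLAIM (what is proved, stated in full; the proofs are below) =====
def Claim_equal_get_coords_between : Prop := ∀ (start : Int × Int) (end_ : Int × Int) (include_end : Bool), Dom_get_coords_between start end_ include_end → Spec_get_coords_between start end_ include_end (get_coords_between start end_ include_end)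

-- ===== LEMMAS AND PROOFS =====

-- A's loop, started with fuel m+1 toward the point m+1 steps away, walks exactly the
-- m strictly-between coordinates.
theorem gcbLoop_eq (rs cs : Int) (h : rs ≠ 0 ∨ cs ≠ 0) :
    ∀ (m : Nat) (r c : Int) (acc : List (Int × Int)),
      gcbLoop (r + ((m : Int)+1) * rs, c + ((m : Int)+1) * cs) rs cs (m+1) r c acc
        = acc ++ (List.range m).map (fun (i : Nat) => (r + ((i : Int)+1) * rs, c + ((i : Int)+1) * cs)) := by
  intro m
  induction m with
  | zero =>
    intro r c acc
    simp [gcbLoop]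
  | succ m ih =>
    intro r c acc
    have hrw : (r + (((m:Nat)+1 : Int)+1) * rs, c + (((m:Nat)+1 : Int)+1) * cs)
        = ((r + rs) + ((m : Int)+1) * rs, (c + cs) + ((m : Int)+1) * cs) := by
      rw [Prod.mk.injEq]; constructor <;> ring
    show gcbLoop _ rs cs (m+1+1) r c acc = _
    push_cast
    rw [hrw, gcbLoop]
    have hne' : (r + rs, c + cs) ≠ ((r + rs) + ((m : Int)+1) * rs, (c + cs) + ((m : Int)+1) * cs) := by
      intro he
      rw [Prod.mk.injEq] at he
      obtain ⟨h1, h2⟩ := he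
      rcases h with h | h
      · have hz : ((m : Int)+1) * rs = 0 := by linarith
        rcases mul_eq_zero.mp hz with h' | h'
        · omega
        · exact h h'
      · have hz : ((m : Int)+1) * cs = 0 := by linarith
        rcases mul_eq_zero.mp hz with h' | h'
        · omega
        · exact h h'
    rw [if_neg hne', ih (r + rs) (c + cs) (acc ++ [(r + rs, c + cs)])]
    rw [List.range_succ_eq_map, List.map_cons, List.map_map]
    simp only [List.append_assoc, List.singleton_append]
    congr 1
    rw [List.cons_eq_cons]
    constructor
    · rw [Prod.mk.injEq]; constructor <;> (push_cast; ring)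
    · apply List.map_congr_left
      intro i _
      simp only [Function.comp]
      rw [Prod.mk.injEq]; constructor <;> (push_cast; ring)

-- In the aligned case, n steps of A's direction land exactly on the displacement.
theorem n_mul_step (dr dc : Int) (h : dr = 0 ∨ dc = 0 ∨ dr.natAbs = dc.natAbs) :
    ((max dr.natAbs dc.natAbs : Nat) : Int) * (if dr > 0 then 1 else if dr < 0 then -1 else 0) = dr := by
  split_ifs <;> omega

-- One axis of B (range / countdown / repeated constant) is the canonical list of the
-- m = n-1 intermediate coordinates of that axis under A's step.
theorem axis_eq (s e d : Int) (n : Nat) (hd : d = e - s)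
    (h : ((n : Nat) : Int) * (if d > 0 then (1:Int) else if d < 0 then -1 else 0) = d) :
    (if d > 0 then PySem.List.pyRange (s + 1) e 1
     else if d < 0 then PySem.List.pyRange (s - 1) e (-1)
     else List.replicate (max (((n : Nat) : Int) - 1) 0).toNat s)
    = (List.range (n - 1)).map
        (fun (i : Nat) => s + ((i : Int)+1) * (if d > 0 then (1:Int) else if d < 0 then -1 else 0)) := by
  split_ifs at h ⊢ with h1 h2
  · -- d > 0 : n = d
    rw [PySem.List.pyRange_one]
    have hlen : (e - (s + 1)).toNat = n - 1 := by omega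
    rw [hlen]
    apply List.map_congr_left
    intro k _
    ring
  · -- d < 0 : n = -d
    rw [PySem.List.pyRange_neg_one]
    have hlen : (s - 1 - e).toNat = n - 1 := by omega
    rw [hlen]
    apply List.map_congr_left
    intro k _
    ring
  · -- d = 0
    have hcount : (max (((n : Nat) : Int) - 1) 0).toNat = n - 1 := by omega
    rw [hcount]
    have : (List.range (n - 1)).map (fun (i : Nat) => s + ((i : Int)+1) * 0)
        = (List.range (n - 1)).map (fun _ => s) := by
      apply List.map_congr_left; intro k _; ring
    rw [this, List.map_const', List.length_range]

theorem get_coords_between_spec : Claim_equal_get_coords_between := by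
  unfold Claim_equal_get_coords_between Spec_get_coords_between
  intro start end_ include_end _
  obtain ⟨sr, sc⟩ := start
  obtain ⟨er, ec⟩ := end_
  simp only [get_coords_between, get_coords_between_alt]
  by_cases hg : sr ≠ er ∧ sc ≠ ec ∧ |er - sr| ≠ |ec - sc|
  · rw [if_pos hg, if_pos hg]
  · rw [if_neg hg, if_neg hg]
    have halign : er - sr = 0 ∨ ec - sc = 0 ∨ (er - sr).natAbs = (ec - sc).natAbs := by
      rw [Int.abs_eq_natAbs (er - sr), Int.abs_eq_natAbs (ec - sc)] at hg
      omega
    have halign' : ec - sc = 0 ∨ er - sr = 0 ∨ (ec - sc).natAbs = (er - sr).natAbs := by omega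
    have hnr := n_mul_step (er - sr) (ec - sc) halign
    have hnc := n_mul_step (ec - sc) (er - sr) halign'
    rw [Nat.max_comm] at hnc
    have hmax : max |er - sr| |ec - sc| = ((max (er - sr).natAbs (ec - sc).natAbs : Nat) : Int) := by
      rw [Int.abs_eq_natAbs (er - sr), Int.abs_eq_natAbs (ec - sc)]
      omega
    rw [hmax]
    have hrows := axis_eq sr er (er - sr) (max (er - sr).natAbs (ec - sc).natAbs) rfl hnr
    have hcols := axis_eq sc ec (ec - sc) (max (er - sr).natAbs (ec - sc).natAbs) rfl hnc
    rw [hrows, hcols, List.zip_map']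
    revert hnr hnc
    generalize (if er - sr > 0 then (1:Int) else if er - sr < 0 then -1 else 0) = rs
    generalize (if ec - sc > 0 then (1:Int) else if ec - sc < 0 then -1 else 0) = cs
    generalize hn : max (er - sr).natAbs (ec - sc).natAbs = n
    intro hnr hnc
    cases n with
    | zero =>
      simp only [Nat.cast_zero, zero_mul] at hnr hnc
      simp [gcbLoop]
    | succ m =>
      have hne0 : rs ≠ 0 ∨ cs ≠ 0 := by
        by_contra hcon
        push_neg at hcon
        rw [hcon.1, mul_zero] at hnr
        rw [hcon.2, mul_zero] at hnc
        omega
      have hend : ((er : Int), (ec : Int)) = (sr + ((m : Int)+1) * rs, sc + ((m : Int)+1) * cs) := by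
        rw [Prod.mk.injEq]
        have h1 : ((m : Int)+1) * rs = er - sr := by push_cast at hnr ⊢; linarith
        have h2 : ((m : Int)+1) * cs = ec - sc := by push_cast at hnc ⊢; linarith
        constructor <;> omega
      have hpath : gcbLoop (er, ec) rs cs (m+1) sr sc []
          = (List.range (m+1-1)).map (fun (i : Nat) => (sr + ((i : Int)+1) * rs, sc + ((i : Int)+1) * cs)) := by
        rw [hend, gcbLoop_eq rs cs hne0 m sr sc [], List.nil_append]
        rfl
      rw [hpath]

-- ===== VERDICT (by name: the statement is the Claim_ definition above) =====
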